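-- pv_equiv track=rewrite | github.com/sudiptap/algods | ds_algo/patterns/dynamic_programming/19_linear_dp/solutions/2522-partition-string-into-substrings-with-values-at-most-k.py | minimumPartition
-- ===== SOURCE A (Python) =====
-- def minimumPartition(s: str, k: int) -> int:
--     parts = 1
--     cur = 0
--
--     for c in s:
--         d = int(c)
--         if d > k:
--             return -1
--         cur = cur * 10 + d
--         if cur > k:
--             parts += 1
--             cur = d
--
--     return parts
-- ===== SOURCE B (Python) =====
-- def minimumPartition(s: str, k: int) -> int:
--     # Segment-at-a-time greedy: each outer iteration consumes one maximal
--     # substring with value <= k; the answer is the number of cuts between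
--     # segments plus one.  No running remainder is carried across segments
--     # as in the single-sweep version.
--     cuts = 0
--     rest = list(s)
--     while rest:
--         val = int(rest[0])
--         if val > k:
--             return -1
--         rest = rest[1:]
--         while rest:
--             d = int(rest[0])
--             if d > k:
--                 return -1
--             if val * 10 + d > k:
--                 break
--             val = val * 10 + d
--             rest = rest[1:]
--         if rest:
--             cuts += 1
--     return cuts + 1
-- ===== Notes on version B (the rewrite author's own statement) =====
-- stated objective: alternative
-- what changed: Replaces A's single flat sweep carrying a running remainder (cur reset on overflow, parts starting at 1) with a segment-at-a-time two-level greedy loop that consumes one maximal substring of value <= k per outer iteration and returns the number of cuts between segments plus one.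
import Mathlib
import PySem

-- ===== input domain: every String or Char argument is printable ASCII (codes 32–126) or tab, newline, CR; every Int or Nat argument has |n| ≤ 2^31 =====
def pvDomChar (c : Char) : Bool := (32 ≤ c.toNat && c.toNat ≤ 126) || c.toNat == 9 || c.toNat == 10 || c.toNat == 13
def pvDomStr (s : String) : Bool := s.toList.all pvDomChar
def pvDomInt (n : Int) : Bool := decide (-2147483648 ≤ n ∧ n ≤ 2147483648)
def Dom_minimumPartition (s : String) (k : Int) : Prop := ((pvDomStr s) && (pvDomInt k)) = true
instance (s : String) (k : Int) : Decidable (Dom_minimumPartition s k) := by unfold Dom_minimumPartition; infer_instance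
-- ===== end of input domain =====

-- B replaces A's single flat sweep carrying a running remainder with a segment-at-a-time
-- two-level greedy loop counting the cuts between maximal substrings of value ≤ k (alternative decomposition, same cost).


-- ===== PORT A =====
-- for c in s: d = int(c); if d > k: return -1; cur = cur*10+d; if cur > k: parts += 1; cur = d
def pvGoA (k : Int) : List Char → Int → Int → Int
  | [], parts, _ => parts
  | c :: cs, parts, cur =>
    match PySem.Int.ofChars? [c] with
    | none => 0          -- int(c) raises ValueError here; such inputs are outside Pre_
    | some d =>
      if d > k then -1
      else if cur * 10 + d > k then pvGoA k cs (parts + 1) d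
      else pvGoA k cs parts (cur * 10 + d)

def minimumPartition (s : String) (k : Int) : Int := pvGoA k s.toList 1 0

-- ===== PORT B =====
-- inner while loop of Source B: extend the current segment while val*10+d ≤ k;
-- `none` is the `return -1` path (also used where int() would raise, which is outside Pre_),
-- `some (val, rest)` is the state at the break / loop exit.
def pvEatB (k : Int) (vl : Int) : List Char → Option (Int × List Char)
  | [] => some (vl, [])
  | c :: cs =>
    match PySem.Int.ofChars? [c] with
    | none => none
    | some d =>
      if d > k then none
      else if vl * 10 + d > k then some (vl, c :: cs)
      else pvEatB k (vl * 10 + d) cs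

theorem pvEatB_length_le (k : Int) : ∀ (cs : List Char) (vl v : Int) (rest : List Char),
    pvEatB k vl cs = some (v, rest) → rest.length ≤ cs.length := by
  intro cs
  induction cs with
  | nil => intro vl v rest h; simp [pvEatB] at h; simp [h.2]
  | cons c cs ih =>
    intro vl v rest h
    simp only [pvEatB] at h
    match hof : PySem.Int.ofChars? [c] with
    | none => rw [hof] at h; simp at h
    | some d =>
      rw [hof] at h
      by_cases h1 : d > k
      · simp [h1] at h
      · by_cases h2 : vl * 10 + d > k
        · simp [h1, h2] at h
          simp [h.2]
        · simp [h1, h2] at h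
          exact Nat.le_succ_of_le (ih _ _ _ h)

-- outer while loop of Source B: consume one segment per iteration, count a cut when more remains
def pvCntB (k : Int) (cuts : Int) : List Char → Int
  | [] => cuts + 1
  | c :: cs =>
    match PySem.Int.ofChars? [c] with
    | none => 0          -- int raises; outside Pre_
    | some vl =>
      if vl > k then -1
      else
        match h : pvEatB k vl cs with
        | none => -1
        | some (_, rest) => pvCntB k (if rest.isEmpty then cuts else cuts + 1) rest
  termination_by cs => cs.length
  decreasing_by exact Nat.lt_succ_of_le (pvEatB_length_le k cs vl _ rest h)

def minimumPartition_alt (s : String) (k : Int) : Int := pvCntB k 0 s.toList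

-- ===== PRECONDITION & SPEC =====
def pvGood (k : Int) (c : Char) : Bool :=
  PySem.Chars.isdigit c && decide (((c.toNat : Int) - 48) ≤ k)

-- Pre_ excludes exactly the inputs where int() raises ValueError (in both programs alike):
-- those where the first character A's scan cannot consume as a digit ≤ k is not a digit.
def Pre_minimumPartition (s : String) (k : Int) : Prop :=
  ((s.toList.dropWhile (pvGood k)).head?.all PySem.Chars.isdigit) = true

instance (s : String) (k : Int) : Decidable (Pre_minimumPartition s k) := by
  unfold Pre_minimumPartition; infer_instance

def pvWitness_minimumPartition : String × Int := ("2026", 10)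

def Spec_minimumPartition (s : String) (k : Int) (out : Int) : Prop := out = minimumPartition_alt s k
instance (s : String) (k : Int) (out : Int) : Decidable (Spec_minimumPartition s k out) := by unfold Spec_minimumPartition; infer_instance

-- ===== CLAIM (what is proved, stated in full; the proofs are below) =====
def Claim_equal_minimumPartition : Prop := ∀ (s : String) (k : Int), Dom_minimumPartition s k → Pre_minimumPartition s k → Spec_minimumPartition s k (minimumPartition s k)

-- ===== LEMMAS AND PROOFS =====
theorem digit_ofChars (c : Char) (h : PySem.Chars.isdigit c = true) :
    PySem.Int.ofChars? [c] = some ((c.toNat : Int) - 48) := by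
  simp [PySem.Chars.isdigit, Char.le_def] at h
  obtain ⟨h1, h2⟩ := h
  have hlo : 48 ≤ c.toNat := h1
  have hhi : c.toNat ≤ 57 := h2
  have hc : c ∈ ['0','1','2','3','4','5','6','7','8','9'] := by
    have hofn := Char.ofNat_toNat c
    interval_cases h3 : c.toNat <;> simp_all [← hofn]
  fin_cases hc <;> decide

-- the invariant Pre_ states, on the unconsumed suffix
def pvP (k : Int) (cs : List Char) : Prop :=
  ((cs.dropWhile (pvGood k)).head?.all PySem.Chars.isdigit) = true

theorem pvP_head_digit (k : Int) (c : Char) (cs : List Char) (h : pvP k (c :: cs)) :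
    PySem.Chars.isdigit c = true := by
  by_cases hg : pvGood k c = true
  · exact (Bool.and_elim_left hg)
  · unfold pvP at h
    rw [List.dropWhile_cons_of_neg hg] at h
    simpa using h

theorem pvP_tail (k : Int) (c : Char) (cs : List Char) (hg : pvGood k c = true)
    (h : pvP k (c :: cs)) : pvP k cs := by
  unfold pvP at h ⊢
  rwa [List.dropWhile_cons_of_pos hg] at h

-- core invariant: A's sweep from state (parts, vl) equals B's inner-then-outer loops,
-- whenever vl ≤ k and the Pre_ invariant holds on the remaining characters
theorem pvCore (k : Int) : ∀ (cs : List Char) (vl parts : Int), vl ≤ k → pvP k cs →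
    pvGoA k cs parts vl =
      (match pvEatB k vl cs with
       | none => -1
       | some (_, rest) => pvCntB k (if rest.isEmpty then parts - 1 else parts) rest) := by
  intro cs
  induction cs with
  | nil => intro vl parts _ _; simp [pvGoA, pvEatB, pvCntB]
  | cons c cs ih =>
    intro vl parts hvl hP
    have hdig : PySem.Chars.isdigit c = true := pvP_head_digit k c cs hP
    have hof := digit_ofChars c hdig
    set d : Int := (c.toNat : Int) - 48 with hd
    by_cases h1 : d > k
    · simp [pvGoA, pvEatB, hof, h1]
    · have hg : pvGood k c = true := by
        simp [pvGood, hdig, ← hd]; omega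
      have hPcs : pvP k cs := pvP_tail k c cs hg hP
      by_cases h2 : vl * 10 + d > k
      · -- A starts a new part; B's inner loop breaks here and the outer loop re-reads c
        have hB : pvCntB k parts (c :: cs) =
            (match pvEatB k d cs with
             | none => -1
             | some (_, rest) => pvCntB k (if rest.isEmpty then parts else parts + 1) rest) := by
          rw [pvCntB]
          simp only [hof, if_neg h1]
          rcases pvEatB k d cs with _ | ⟨v, rest⟩ <;> simp
        simp only [pvGoA, pvEatB, hof, if_neg h1, if_pos h2]
        rw [ih d (parts + 1) (by omega) hPcs]
        simp only [List.isEmpty_cons, Bool.false_eq_true, if_false, add_sub_cancel_right]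
        rw [hB]
      · simp only [pvGoA, pvEatB, hof, if_neg h1, if_neg h2]
        exact ih (vl * 10 + d) parts (by omega) hPcs

-- ===== VERDICT (by name: the statement is the Claim_ definition above) =====
theorem minimumPartition_spec : Claim_equal_minimumPartition := by
  intro s k _ hPre
  unfold Spec_minimumPartition minimumPartition minimumPartition_alt
  unfold Pre_minimumPartition at hPre
  match hL : s.toList with
  | [] => simp [pvGoA, pvCntB]
  | c :: cs =>
    rw [hL] at hPre
    have hP' : pvP k (c :: cs) := hPre
    have hdig : PySem.Chars.isdigit c = true := pvP_head_digit k c cs hP'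
    have hof := digit_ofChars c hdig
    set d : Int := (c.toNat : Int) - 48 with hd
    by_cases h1 : d > k
    · rw [pvCntB]
      simp [pvGoA, hof, h1]
    · have hg : pvGood k c = true := by
        simp [pvGood, hdig, ← hd]; omega
      have hPcs : pvP k cs := pvP_tail k c cs hg hP'
      have hA : pvGoA k (c :: cs) 1 0 = pvGoA k cs 1 d := by
        simp [pvGoA, hof, h1]
      have hB : pvCntB k 0 (c :: cs) =
          (match pvEatB k d cs with
           | none => -1
           | some (_, rest) => pvCntB k (if rest.isEmpty then 0 else 0 + 1) rest) := by
        rw [pvCntB]; simp only [hof, if_neg h1]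
        rcases pvEatB k d cs with _ | ⟨v, rest⟩ <;> simp
      rw [hA, hB]
      have hc := pvCore k cs d 1 (by omega) hPcs
      simpa using hc
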